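-- pv_equiv track=rewrite | github.com/LewisStaples/advent_of_code_2017 | day09/day09.py | process_garbage
-- ===== SOURCE A (Python) =====
-- def process_garbage(in_string):
--     ret_str = ''
--     ret_count = 0
--     string_i = 0
--     while string_i < len(in_string):
--         if in_string[string_i] == '>':
--             index_lt = in_string.index('<')
--             ret_count += max((string_i - index_lt - 1), 0)
--             in_string = in_string[:index_lt] + in_string[string_i + 1:]
--             string_i -= (string_i - index_lt)
--
--         string_i += 1
--
--     ret_str += in_string
--     return ret_str, ret_count
-- ===== SOURCE B (Python) =====
-- def process_garbage(in_string):
--     out = []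
--     buf = []
--     in_garbage = False
--     count = 0
--     for ch in in_string:
--         if not in_garbage:
--             if ch == '<':
--                 in_garbage = True
--                 buf = []
--             else:
--                 out.append(ch)
--         elif ch == '>':
--             count += len(buf)
--             in_garbage = False
--         else:
--             buf.append(ch)
--     if in_garbage:
--         out.append('<')
--         out.extend(buf)
--     return ''.join(out), count
-- ===== Notes on version B (the rewrite author's own statement) =====
-- stated objective: faster
-- what changed: A repeatedly rescans and re-slices the whole string (str.index('<') plus concatenation of two slices for every garbage group); B makes one linear pass with an inside-garbage flag, appending kept characters and counting buffered garbage characters.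
-- outside the precondition, e.g. on process_garbage('>a<b>'): A returns ('>aa', 1), B returns ('>a', 1); on process_garbage('a>'): A raises ValueError, B returns ('a>', 0); on process_garbage('>'): A raises ValueError, B returns ('>', 0)
import Mathlib
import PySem

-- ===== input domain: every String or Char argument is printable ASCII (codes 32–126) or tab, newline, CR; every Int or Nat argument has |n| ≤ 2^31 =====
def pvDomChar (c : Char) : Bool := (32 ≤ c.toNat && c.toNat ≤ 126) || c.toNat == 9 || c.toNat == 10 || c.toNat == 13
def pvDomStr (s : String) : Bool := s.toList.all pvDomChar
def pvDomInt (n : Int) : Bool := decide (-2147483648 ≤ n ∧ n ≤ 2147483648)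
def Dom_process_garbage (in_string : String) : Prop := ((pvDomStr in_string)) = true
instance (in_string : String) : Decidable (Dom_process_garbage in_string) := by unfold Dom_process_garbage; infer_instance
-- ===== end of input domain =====

-- B replaces A's repeated str.index/splice passes (quadratic re-slicing of the string) by a
-- single left-to-right pass with an inside-garbage flag; objective: faster.

-- ===== PORT A =====
-- termination helpers for pgLoopA (cited by its decreasing_by)
theorem pg_dec2 (a c : Nat) (h : c < a) : a - (c + 1) < a - c := by
  rw [← Nat.sub_sub]
  exact Nat.sub_lt (Nat.sub_pos_of_lt h) Nat.one_pos

theorem pg_dec1 (a b c : Nat) (h : c < a) :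
    min b a + (a - (c + 1)) - (b + 1) < a - c :=
  calc min b a + (a - (c + 1)) - (b + 1)
      ≤ b + (a - (c + 1)) - (b + 1) :=
        Nat.sub_le_sub_right (Nat.add_le_add_right (Nat.min_le_left b a) _) _
    _ = a - (c + 1) - 1 := Nat.add_sub_add_left b (a - (c + 1)) 1
    _ ≤ a - (c + 1) := Nat.sub_le _ _
    _ < a - c := pg_dec2 a c h

def pgLoopA (s : List Char) (i : Nat) (cnt : Int) : List Char × Int :=
  if h : i < s.length then
    if s[i] = '>' then
      match PySem.List.index? s '<' with
      | none => (s, cnt)   -- Python raises ValueError here; excluded by Pre_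
      | some j =>
          pgLoopA (s.take j ++ s.drop (i + 1)) (j + 1)
            (cnt + max ((i : Int) - (j : Int) - 1) 0)
    else pgLoopA s (i + 1) cnt
  else (s, cnt)
termination_by s.length - i
decreasing_by
  · simp only [List.length_append, List.length_take, List.length_drop]
    exact pg_dec1 s.length j i h
  · exact pg_dec2 s.length i h

def process_garbage (in_string : String) : String × Int :=
  let r := pgLoopA in_string.toList 0 0
  (String.mk r.1, r.2)

-- ===== PORT B =====
def stepB (st : List Char × List Char × Bool × Int) (c : Char) :
    List Char × List Char × Bool × Int :=
  match st with
  | (out, buf, inG, cnt) =>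
    if inG = false then
      if c = '<' then (out, [], true, cnt)
      else (out ++ [c], buf, inG, cnt)
    else if c = '>' then (out, buf, false, cnt + buf.length)
    else (out, buf ++ [c], inG, cnt)

def finishB (st : List Char × List Char × Bool × Int) : String × Int :=
  match st with
  | (out, buf, inG, cnt) => (String.mk (if inG then out ++ '<' :: buf else out), cnt)

def process_garbage_alt (in_string : String) : String × Int :=
  finishB (in_string.toList.foldl stepB ([], [], false, 0))

-- ===== PRECONDITION & SPEC =====
-- Pre_ excludes strings containing a '>' that is not closing a garbage span (no '<' since the
-- previous '>'), on which A either raises ValueError (str.index finds no '<') or returns an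
-- accidental value of its splice arithmetic (it can even duplicate part of the string).
def Pre_process_garbage (in_string : String) : Prop :=
  ∀ i < in_string.toList.length, in_string.toList[i]? = some '>' →
    ∃ j < i, in_string.toList[j]? = some '<' ∧
      ∀ k < i, j < k → in_string.toList[k]? ≠ some '>'

instance (in_string : String) : Decidable (Pre_process_garbage in_string) := by
  unfold Pre_process_garbage; infer_instance

def pvWitness_process_garbage : String := "a<b>c"

def Spec_process_garbage (in_string : String) (out : String × Int) : Prop :=
  out = process_garbage_alt in_string

instance (in_string : String) (out : String × Int) : Decidable (Spec_process_garbage in_string out) := by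
  unfold Spec_process_garbage; infer_instance

-- ===== CLAIM (what is proved, stated in full; the proofs are below) =====
def Claim_equal_process_garbage : Prop := ∀ (in_string : String), Dom_process_garbage in_string → Pre_process_garbage in_string → Spec_process_garbage in_string (process_garbage in_string)

-- ===== LEMMAS AND PROOFS =====

-- list-level form of Pre_
def PreL (l : List Char) : Prop :=
  ∀ i < l.length, l[i]? = some '>' →
    ∃ j < i, l[j]? = some '<' ∧ ∀ k < i, j < k → l[k]? ≠ some '>'

-- the same condition as a structural recursion with an inside-garbage flag (the proof's working form)
def goodF : List Char → Bool → Bool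
  | [], _ => true
  | c :: r, false => if c = '>' then false else if c = '<' then goodF r true else goodF r false
  | c :: r, true => if c = '>' then goodF r false else goodF r true

def listFinish (st : List Char × List Char × Bool × Int) : List Char × Int :=
  (if st.2.2.1 then st.1 ++ '<' :: st.2.1 else st.1, st.2.2.2)

theorem finishB_eq (st : List Char × List Char × Bool × Int) :
    finishB st = (String.mk (listFinish st).1, (listFinish st).2) := by
  obtain ⟨o, b, g, c⟩ := st
  cases g <;> simp [finishB, listFinish]

-- first-occurrence decomposition
theorem first_split {c : Char} : ∀ l : List Char, c ∈ l → ∃ a b, l = a ++ c :: b ∧ c ∉ a := by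
  intro l hl
  induction l with
  | nil => cases hl
  | cons x t ih =>
    by_cases hx : x = c
    · exact ⟨[], t, by simp [hx], by simp⟩
    · have hct : c ∈ t := by
        rcases List.mem_cons.mp hl with h | h
        · exact absurd h.symm hx
        · exact h
      rcases ih hct with ⟨a, b, h1, h2⟩
      refine ⟨x :: a, b, by simp [h1], ?_⟩
      simp only [List.mem_cons, not_or]
      exact ⟨fun h => hx h.symm, h2⟩

theorem goodF_no_gt {m : List Char} (h : '>' ∉ m) : ∀ fl, goodF m fl = true := by
  induction m with
  | nil => intro fl; cases fl <;> rfl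
  | cons c t ih =>
    intro fl
    simp only [List.mem_cons, not_or] at h
    have hc : ¬ (c = '>') := fun hh => h.1 hh.symm
    cases fl <;> simp [goodF, hc, ih h.2]

theorem goodF_garb_append {m t : List Char} (h : '>' ∉ m) :
    goodF (m ++ '>' :: t) true = goodF t false := by
  induction m with
  | nil => simp [goodF]
  | cons c m' ih =>
    simp only [List.mem_cons, not_or] at h
    have hc : ¬ (c = '>') := fun hh => h.1 hh.symm
    simp [goodF, hc, ih h.2]

theorem goodF_decomp {a t : List Char} (h : '>' ∉ a) :
    (goodF (a ++ '>' :: t) false = true ↔ '<' ∈ a ∧ goodF t false = true) := by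
  induction a with
  | nil => simp [goodF]
  | cons c a' ih =>
    simp only [List.mem_cons, not_or] at h
    have hc : ¬ (c = '>') := fun hh => h.1 hh.symm
    by_cases hlt : c = '<'
    · subst hlt
      simp [goodF, goodF_garb_append h.2]
    · have hlt' : ¬ ('<' = c) := fun hh => hlt hh.symm
      simp [goodF, hc, hlt, hlt', ih h.2]

theorem preL_no_gt {l : List Char} (h : '>' ∉ l) : PreL l := by
  intro i hi hgt
  exact absurd (List.mem_of_getElem? hgt) h

theorem preL_decomp {a t : List Char} (h : '>' ∉ a) :
    (PreL (a ++ '>' :: t) ↔ '<' ∈ a ∧ PreL t) := by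
  have hmid : (a ++ '>' :: t)[a.length]? = some '>' := by
    rw [List.getElem?_append_right (le_refl _)]
    simp
  constructor
  · intro H
    obtain ⟨j, hjlt, hjv, hall⟩ := H a.length (by simp) hmid
    have hja : a[j]? = some '<' := by
      rwa [List.getElem?_append_left hjlt] at hjv
    refine ⟨List.mem_iff_getElem?.mpr ⟨j, hja⟩, ?_⟩
    intro i' hi' hgt'
    have hglobal : (a ++ '>' :: t)[a.length + 1 + i']? = some '>' := by
      rw [List.getElem?_append_right (by omega)]
      have h2 : a.length + 1 + i' - a.length = i' + 1 := by omega
      rw [h2]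
      simpa using hgt'
    obtain ⟨j2, hj2lt, hj2v, hall2⟩ := H (a.length + 1 + i') (by simp; omega) hglobal
    have hj2gt : a.length < j2 := by
      rcases Nat.lt_trichotomy j2 a.length with h1 | h1 | h1
      · exact absurd hmid (hall2 a.length (by omega) h1)
      · rw [h1, hmid] at hj2v; cases hj2v
      · exact h1
    refine ⟨j2 - a.length - 1, by omega, ?_, ?_⟩
    · rw [List.getElem?_append_right (by omega)] at hj2v
      have h2 : j2 - a.length = (j2 - a.length - 1) + 1 := by omega
      rw [h2] at hj2v
      simpa using hj2v
    · intro k' hk' hjk'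
      have hk := hall2 (a.length + 1 + k') (by omega) (by omega)
      rw [List.getElem?_append_right (by omega)] at hk
      have h2 : a.length + 1 + k' - a.length = k' + 1 := by omega
      rw [h2] at hk
      simpa using hk
  · rintro ⟨hma, hpt⟩ i hi hgt
    rcases Nat.lt_trichotomy i a.length with h1 | h1 | h1
    · exfalso
      rw [List.getElem?_append_left h1] at hgt
      exact h (List.mem_of_getElem? hgt)
    · obtain ⟨j, hj⟩ := List.mem_iff_getElem?.mp hma
      have hjlen : j < a.length := (List.getElem?_eq_some_iff.mp hj).1
      refine ⟨j, by omega, by rw [List.getElem?_append_left hjlen]; exact hj, ?_⟩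
      intro k hk hjk hcon
      rw [List.getElem?_append_left (by omega)] at hcon
      exact h (List.mem_of_getElem? hcon)
    · have hti : t[i - a.length - 1]? = some '>' := by
        rw [List.getElem?_append_right (by omega)] at hgt
        have h2 : i - a.length = (i - a.length - 1) + 1 := by omega
        rw [h2] at hgt
        simpa using hgt
      have hi't : i - a.length - 1 < t.length := (List.getElem?_eq_some_iff.mp hti).1
      obtain ⟨j', hj'lt, hj'v, hall'⟩ := hpt (i - a.length - 1) hi't hti
      refine ⟨a.length + 1 + j', by omega, ?_, ?_⟩
      · rw [List.getElem?_append_right (by omega)]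
        have h2 : a.length + 1 + j' - a.length = j' + 1 := by omega
        rw [h2]
        simpa using hj'v
      · intro k hk hjk
        rw [List.getElem?_append_right (by omega)]
        have h2 : k - a.length = (k - a.length - 1) + 1 := by omega
        rw [h2]
        simpa using hall' (k - a.length - 1) (by omega) (by omega)

theorem preL_iff_good : ∀ l : List Char, PreL l ↔ goodF l false = true := by
  have main : ∀ n : Nat, ∀ l : List Char, l.length ≤ n → (PreL l ↔ goodF l false = true) := by
    intro n
    induction n with
    | zero =>
      intro l hl
      cases l with
      | nil =>
        simp [goodF]
        exact preL_no_gt (by simp)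
      | cons c t => simp at hl
    | succ n ih =>
      intro l hl
      by_cases hgt : '>' ∈ l
      · obtain ⟨a, b, rfl, hna⟩ := first_split l hgt
        rw [preL_decomp hna, goodF_decomp hna,
            ih b (by simp at hl; omega)]
      · constructor
        · intro _; exact goodF_no_gt hgt false
        · intro _; exact preL_no_gt hgt
  exact fun l => main l.length l le_rfl

-- B-side fold lemmas
theorem foldB_garb {m : List Char} (h : '>' ∉ m) :
    ∀ (out buf : List Char) (cnt : Int),
      List.foldl stepB (out, buf, true, cnt) m = (out, buf ++ m, true, cnt) := by
  induction m with
  | nil => intro out buf cnt; simp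
  | cons c m' ih =>
    intro out buf cnt
    simp only [List.mem_cons, not_or] at h
    have hc : ¬ (c = '>') := fun hh => h.1 hh.symm
    have hstep : stepB (out, buf, true, cnt) c = (out, buf ++ [c], true, cnt) := by
      simp [stepB, hc]
    rw [List.foldl_cons, hstep, ih h.2]
    simp

theorem foldB_close {m : List Char} (h : '>' ∉ m) (t : List Char) :
    ∀ (out buf : List Char) (cnt : Int),
      List.foldl stepB (out, buf, true, cnt) (m ++ '>' :: t)
        = List.foldl stepB (out, buf ++ m, false, cnt + (buf ++ m).length) t := by
  induction m with
  | nil =>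
    intro out buf cnt
    have hstep : stepB (out, buf, true, cnt) '>' = (out, buf, false, cnt + buf.length) := by
      simp [stepB]
    simp only [List.nil_append, List.foldl_cons, hstep, List.append_nil]
  | cons c m' ih =>
    intro out buf cnt
    simp only [List.mem_cons, not_or] at h
    have hc : ¬ (c = '>') := fun hh => h.1 hh.symm
    have hstep : stepB (out, buf, true, cnt) c = (out, buf ++ [c], true, cnt) := by
      simp [stepB, hc]
    rw [List.cons_append, List.foldl_cons, hstep, ih h.2]
    simp

theorem foldB_buf_irrel : ∀ (r : List Char) (out buf1 buf2 : List Char) (cnt : Int),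
    listFinish (List.foldl stepB (out, buf1, false, cnt) r)
      = listFinish (List.foldl stepB (out, buf2, false, cnt) r) := by
  intro r
  induction r with
  | nil => intro out buf1 buf2 cnt; simp [listFinish]
  | cons c r' ih =>
    intro out buf1 buf2 cnt
    by_cases hc : c = '<'
    · simp [stepB, hc]
    · have hstep : ∀ buf, stepB (out, buf, false, cnt) c = (out ++ [c], buf, false, cnt) := by
        intro buf; simp [stepB, hc]
      rw [List.foldl_cons, List.foldl_cons, hstep buf1, hstep buf2]
      exact ih (out ++ [c]) buf1 buf2 cnt

-- A-side scan lemma: positions holding no '>' are just skipped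
theorem pgLoopA_scan {m : List Char} (h : '>' ∉ m) :
    ∀ (u v : List Char) (cnt : Int),
      pgLoopA (u ++ m ++ v) u.length cnt = pgLoopA (u ++ m ++ v) (u.length + m.length) cnt := by
  induction m with
  | nil => intro u v cnt; simp
  | cons c m' ih =>
    intro u v cnt
    simp only [List.mem_cons, not_or] at h
    have hc : ¬ (c = '>') := fun hh => h.1 hh.symm
    have hlen : u.length < (u ++ (c :: m') ++ v).length := by simp
    have hget? : (u ++ (c :: m') ++ v)[u.length]? = some c := by
      rw [List.append_assoc, List.getElem?_append_right (le_refl _)]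
      simp
    obtain ⟨hb, hget⟩ := List.getElem?_eq_some_iff.mp hget?
    conv_lhs => rw [pgLoopA]
    rw [dif_pos hlen, hget, if_neg hc]
    have hassoc : u ++ (c :: m') ++ v = (u ++ [c]) ++ m' ++ v := by simp
    have h1 : u.length + 1 = (u ++ [c]).length := by simp
    rw [hassoc, h1, ih h.2 (u ++ [c]) v cnt]
    have h2 : (u ++ [c]).length + m'.length = u.length + (c :: m').length := by
      simp
      omega
    rw [h2, ← hassoc]

theorem index?_first {p w : List Char} (h : '<' ∉ p) :
    PySem.List.index? (p ++ '<' :: w) '<' = some p.length := by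
  rw [PySem.List.index?_eq_some_iff]
  exact ⟨p, w, rfl, rfl, h⟩

-- one unfolding of A's loop at a closing '>'
theorem pgLoopA_gt {p m r'' : List Char} (hp : '<' ∉ p) (cnt : Int) :
    pgLoopA (p ++ '<' :: (m ++ '>' :: r'')) (p.length + 1 + m.length) cnt
      = pgLoopA (p ++ r'') (p.length + 1) (cnt + m.length) := by
  have hlen : p.length + 1 + m.length < (p ++ '<' :: (m ++ '>' :: r'')).length := by
    simp
    omega
  have hget? : (p ++ '<' :: (m ++ '>' :: r''))[p.length + 1 + m.length]? = some '>' := by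
    have hshape : p ++ '<' :: (m ++ '>' :: r'') = (p ++ '<' :: m) ++ '>' :: r'' := by simp
    rw [hshape, List.getElem?_append_right (by simp; omega)]
    have h2 : p.length + 1 + m.length - (p ++ '<' :: m).length = 0 := by simp; omega
    rw [h2]
    rfl
  obtain ⟨hb, hget⟩ := List.getElem?_eq_some_iff.mp hget?
  have hidx : PySem.List.index? (p ++ '<' :: (m ++ '>' :: r'')) '<' = some p.length :=
    index?_first hp
  conv_lhs => rw [pgLoopA]
  rw [dif_pos hlen, hget, if_pos rfl, hidx]
  have htake : (p ++ '<' :: (m ++ '>' :: r'')).take p.length = p := by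
    simp
  have hdrop : (p ++ '<' :: (m ++ '>' :: r'')).drop (p.length + 1 + m.length + 1) = r'' := by
    have hshape : p ++ '<' :: (m ++ '>' :: r'') = (p ++ '<' :: m ++ ['>']) ++ r'' := by simp
    have hl : (p ++ '<' :: m ++ ['>']).length = p.length + 1 + m.length + 1 := by
      simp
      omega
    rw [hshape, ← hl, List.drop_left]
  have hcnt : cnt + max ((↑(p.length + 1 + m.length) : Int) - ↑p.length - 1) 0 = cnt + m.length := by
    push_cast
    have h2 : (↑p.length + 1 + ↑m.length : Int) - ↑p.length - 1 = ↑m.length := by ring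
    rw [h2]
    simp
  simp only [htake, hdrop, hcnt]

-- main invariant: A's splice loop against B's fold, over a good remainder
theorem mainAux : ∀ n : Nat, ∀ r : List Char, r.length ≤ n → goodF r false = true →
    ∀ (p : List Char) (cnt : Int), '<' ∉ p → '>' ∉ p →
      (pgLoopA (p ++ r) p.length cnt = listFinish (List.foldl stepB (p, [], false, cnt) r)
      ∧ ∀ c r', r = c :: r' → c ≠ '>' →
          pgLoopA (p ++ r) (p.length + 1) cnt
            = listFinish (List.foldl stepB (p, [], false, cnt) r)) := by
  intro n
  induction n with
  | zero =>
    intro r hr hg p cnt hp1 hp2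
    cases r with
    | cons c t => simp at hr
    | nil =>
      constructor
      · rw [pgLoopA]
        simp [listFinish]
      · intro c r' hcon; cases hcon
  | succ n ih =>
    intro r hr hg p cnt hp1 hp2
    have A2 : ∀ c r', r = c :: r' → c ≠ '>' →
        pgLoopA (p ++ r) (p.length + 1) cnt
          = listFinish (List.foldl stepB (p, [], false, cnt) r) := by
      intro c r' hr' hc
      subst hr'
      by_cases hlt : c = '<'
      · subst hlt
        have hgarb : goodF r' true = true := by
          simpa [goodF] using hg
        have hB0 : List.foldl stepB (p, [], false, cnt) ('<' :: r')
            = List.foldl stepB (p, [], true, cnt) r' := by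
          have hstep : stepB (p, [], false, cnt) '<' = (p, [], true, cnt) := by
            simp [stepB]
          rw [List.foldl_cons, hstep]
        by_cases hmem : '>' ∈ r'
        · obtain ⟨m, r'', rfl, hm⟩ := first_split r' hmem
          have hgr : goodF r'' false = true := by
            rwa [goodF_garb_append hm] at hgarb
          -- A side: scan over m, then the closing step
          have hscan := pgLoopA_scan hm (p ++ ['<']) ('>' :: r'') cnt
          have hsh : (p ++ ['<']) ++ m ++ '>' :: r'' = p ++ '<' :: (m ++ '>' :: r'') := by simp
          have hlen1 : (p ++ ['<']).length = p.length + 1 := by simp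
          rw [hsh, hlen1] at hscan
          have hAstep := pgLoopA_gt (m := m) (r'' := r'') hp1 cnt
          -- B side
          have hB : List.foldl stepB (p, [], false, cnt) ('<' :: (m ++ '>' :: r''))
              = List.foldl stepB (p, m, false, cnt + m.length) r'' := by
            rw [hB0, foldB_close hm r'' p [] cnt]
            simp
          rw [hscan, hAstep, hB,
              foldB_buf_irrel r'' p m [] (cnt + (m.length : Int))]
          cases r'' with
          | nil =>
            rw [pgLoopA]
            simp [listFinish]
          | cons c2 r2 =>
            have hc2 : c2 ≠ '>' := by
              intro hh
              subst hh
              simp [goodF] at hgr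
            have hlen2 : (c2 :: r2).length ≤ n := by
              simp at hr ⊢
              omega
            exact (ih (c2 :: r2) hlen2 hgr p (cnt + (m.length : Int)) hp1 hp2).2 c2 r2 rfl hc2
        · -- unclosed garbage: runs to the end of the string
          have hscan := pgLoopA_scan hmem (p ++ ['<']) [] cnt
          have hsh : (p ++ ['<']) ++ r' ++ [] = p ++ '<' :: r' := by simp
          have hlen1 : (p ++ ['<']).length = p.length + 1 := by simp
          rw [hsh, hlen1] at hscan
          rw [hscan]
          have hend : ¬ (p.length + 1 + r'.length < (p ++ '<' :: r').length) := by
            simp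
            omega
          rw [pgLoopA, dif_neg hend, hB0, foldB_garb hmem p [] cnt]
          simp [listFinish]
      · -- ordinary character: goes straight to the output
        have hcc : ¬ (c = '>') := hc
        have hgr : goodF r' false = true := by
          simpa [goodF, hcc, hlt] using hg
        have hassoc : p ++ c :: r' = (p ++ [c]) ++ r' := by simp
        have hlen1 : p.length + 1 = (p ++ [c]).length := by simp
        have hp1' : '<' ∉ p ++ [c] := by
          simp only [List.mem_append, List.mem_singleton, not_or]
          exact ⟨hp1, fun hh => hlt hh.symm⟩
        have hp2' : '>' ∉ p ++ [c] := by
          simp only [List.mem_append, List.mem_singleton, not_or]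
          exact ⟨hp2, fun hh => hc hh.symm⟩
        have hlen2 : r'.length ≤ n := by simp at hr; omega
        have hIH := (ih r' hlen2 hgr (p ++ [c]) cnt hp1' hp2').1
        rw [hassoc, hlen1, hIH]
        have hB : List.foldl stepB (p, [], false, cnt) (c :: r')
            = List.foldl stepB (p ++ [c], [], false, cnt) r' := by
          have hstep : stepB (p, [], false, cnt) c = (p ++ [c], [], false, cnt) := by
            simp [stepB, hlt]
          rw [List.foldl_cons, hstep]
        rw [hB]
    refine ⟨?_, A2⟩
    cases r with
    | nil =>
      rw [pgLoopA]
      simp [listFinish]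
    | cons c r' =>
      have hc : c ≠ '>' := by
        intro hh
        subst hh
        simp [goodF] at hg
      have hm1 : '>' ∉ [c] := by
        simp only [List.mem_singleton]
        exact fun hh => hc hh.symm
      have hstep := pgLoopA_scan hm1 p r' cnt
      have hsh : p ++ [c] ++ r' = p ++ c :: r' := by simp
      rw [hsh] at hstep
      simp only [List.length_cons, List.length_nil] at hstep
      rw [hstep]
      exact A2 c r' rfl hc

-- ===== VERDICT (by name: the statement is the Claim_ definition above) =====
theorem process_garbage_spec : Claim_equal_process_garbage := by
  intro s _ hpre
  have hg : goodF s.toList false = true := (preL_iff_good s.toList).mp hpre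
  obtain ⟨h1, -⟩ := mainAux s.toList.length s.toList le_rfl hg [] 0 (by simp) (by simp)
  simp only [List.nil_append, List.length_nil] at h1
  show process_garbage s = process_garbage_alt s
  unfold process_garbage process_garbage_alt
  rw [finishB_eq, ← h1]
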